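-- pv_equiv track=rewrite | github.com/kellymhli/code-challenges | lazy-lemmings/lemmings.py | furthest
-- ===== SOURCE A (Python) =====
-- def furthest(num_holes, cafes):
--     """Find longest distance between a hole and a cafe."""
--
--     longest_distance = 0
--     count = 0
--     for i in range(0, num_holes):
--         if i not in cafes:
--             count += 1
--             if count > longest_distance:
--                 longest_distance = count
--         else:
--             if count > longest_distance:
--                 longest_distance = count
--             count = 0
--
--     return longest_distance
-- ===== SOURCE B (Python) =====
-- def furthest(num_holes, cafes):
--     """Find longest distance between a hole and a cafe."""
--     # Boundary-gap scan: sort the distinct in-range cafes and take the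
--     # largest gap between consecutive boundaries (virtual boundaries at
--     # -1 and num_holes).
--     bounds = sorted(set(c for c in cafes if 0 <= c < num_holes))
--     best = 0
--     prev = -1
--     for b in bounds:
--         best = max(best, b - prev - 1)
--         prev = b
--     return max(best, num_holes - prev - 1)
-- ===== Notes on version B (the rewrite author's own statement) =====
-- stated objective: faster
-- what changed: Replaced the per-hole loop with an 'i in cafes' list scan at every hole by sorting the distinct in-range cafes once and scanning consecutive boundary gaps (virtual boundaries at -1 and num_holes), keeping the maximum gap.
import Mathlib
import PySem

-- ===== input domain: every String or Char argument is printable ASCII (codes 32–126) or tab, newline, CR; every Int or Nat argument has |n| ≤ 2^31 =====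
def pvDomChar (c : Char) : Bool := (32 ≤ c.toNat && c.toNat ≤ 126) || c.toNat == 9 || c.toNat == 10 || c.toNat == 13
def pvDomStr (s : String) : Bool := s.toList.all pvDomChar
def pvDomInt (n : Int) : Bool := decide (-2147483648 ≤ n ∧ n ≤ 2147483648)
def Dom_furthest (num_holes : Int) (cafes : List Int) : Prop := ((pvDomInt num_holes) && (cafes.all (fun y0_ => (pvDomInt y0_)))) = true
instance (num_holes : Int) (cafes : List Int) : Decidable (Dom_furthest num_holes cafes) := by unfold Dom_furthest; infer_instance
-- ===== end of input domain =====

-- B replaces A's per-hole scan (with an `in cafes` list scan per hole) by a sort of the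
-- distinct in-range cafes followed by one gap scan over consecutive boundaries (objective: faster).


-- ===== PORT A =====
-- state = (longest_distance, count)
def furthest (num_holes : Int) (cafes : List Int) : Int :=
  let s := (PySem.List.pyRange 0 num_holes 1).foldl
    (fun (st : Int × Int) i =>
      if ¬ (i ∈ cafes) then
        let count := st.2 + 1
        (if count > st.1 then count else st.1, count)
      else
        (if st.2 > st.1 then st.2 else st.1, 0))
    (0, 0)
  s.1

-- ===== PORT B =====
-- state = (best, prev)
def furthest_alt (num_holes : Int) (cafes : List Int) : Int :=
  let bounds := PySem.List.sorted
    (PySem.Set.ofList (cafes.filter (fun c => decide (0 ≤ c) && decide (c < num_holes))))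
    (fun x => x) false
  let s := bounds.foldl (fun (st : Int × Int) b => (max st.1 (b - st.2 - 1), b)) (0, -1)
  max s.1 (num_holes - s.2 - 1)

-- ===== PRECONDITION & SPEC =====
def Spec_furthest (num_holes : Int) (cafes : List Int) (out : Int) : Prop := out = furthest_alt num_holes cafes
instance (num_holes : Int) (cafes : List Int) (out : Int) : Decidable (Spec_furthest num_holes cafes out) := by unfold Spec_furthest; infer_instance

-- ===== CLAIM (what is proved, stated in full; the proofs are below) =====
def Claim_equal_furthest : Prop := ∀ (num_holes : Int) (cafes : List Int), Dom_furthest num_holes cafes → Spec_furthest num_holes cafes (furthest num_holes cafes)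

-- ===== LEMMAS AND PROOFS =====

-- A's loop step
def stepA (cafes : List Int) (st : Int × Int) (i : Int) : Int × Int :=
  if ¬ (i ∈ cafes) then
    let count := st.2 + 1
    (if count > st.1 then count else st.1, count)
  else
    (if st.2 > st.1 then st.2 else st.1, 0)

-- B's loop step
def stepB (st : Int × Int) (b : Int) : Int × Int := (max st.1 (b - st.2 - 1), b)

-- B's sorted boundary list equals the in-range prefix of the number line filtered by membership
lemma bounds_eq (num_holes : Int) (cafes : List Int) :
    PySem.List.sorted
      (PySem.Set.ofList (cafes.filter (fun c => decide (0 ≤ c) && decide (c < num_holes))))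
      (fun x => x) false
    = (PySem.List.pyRange 0 num_holes 1).filter (fun i => decide (i ∈ cafes)) := by
  apply PySem.List.sorted_eq_of_perm_of_pairwise_lt
  · rw [List.perm_ext_iff_of_nodup]
    · intro x
      simp [PySem.Set.mem_ofList, List.mem_filter, PySem.List.mem_pyRange_one, and_comm]
    · exact (PySem.List.pairwise_lt_pyRange_one 0 num_holes).filter _ |>.nodup
    · exact PySem.Set.nodup_ofList _
  · exact (PySem.List.pairwise_lt_pyRange_one 0 num_holes).filter _

-- the loop invariant relating A's state after the first n holes to B's state over the
-- boundaries among the first n holes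
lemma invariant (cafes : List Int) (n : Nat) :
    let sA := (PySem.List.pyRange 0 (n : Int) 1).foldl (stepA cafes) (0, 0)
    let sB := ((PySem.List.pyRange 0 (n : Int) 1).filter (fun i => decide (i ∈ cafes))).foldl stepB (0, -1)
    sA.1 = max sB.1 ((n : Int) - sB.2 - 1) ∧ sA.2 = (n : Int) - sB.2 - 1 ∧
      0 ≤ sB.1 ∧ -1 ≤ sB.2 ∧ sB.2 < (n : Int) := by
  induction n with
  | zero => simp [PySem.List.pyRange_one_eq_nil]
  | succ m ih =>
    have hr : PySem.List.pyRange 0 ((m : Int) + 1) 1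
        = PySem.List.pyRange 0 (m : Int) 1 ++ [(m : Int)] :=
      PySem.List.pyRange_one_succ_right (by exact_mod_cast Nat.zero_le m)
    intro sA sB
    simp only [sA, sB, Nat.cast_succ, hr, List.filter_append, List.foldl_append]
    obtain ⟨h1, h2, h3, h4, h5⟩ := ih
    generalize hA : List.foldl (stepA cafes) (0, 0) (PySem.List.pyRange 0 (m : Int) 1) = SA at h1 h2 ⊢
    generalize hB : List.foldl stepB (0, -1)
        (List.filter (fun i => decide (i ∈ cafes)) (PySem.List.pyRange 0 (m : Int) 1)) = SB at h1 h2 h3 h4 h5 ⊢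
    obtain ⟨la, ca⟩ := SA
    obtain ⟨bb, pb⟩ := SB
    by_cases hm : (m : Int) ∈ cafes <;>
      simp only [List.filter_cons, List.filter_nil, hm, decide_true, decide_false,
        if_true, if_false, List.foldl_cons, List.foldl_nil, stepA, stepB,
        not_true, not_false_iff, max_def] <;>
      split_ifs at h1 ⊢ <;> simp_all <;> omega

lemma furthest_eq_alt (num_holes : Int) (cafes : List Int) :
    furthest num_holes cafes = furthest_alt num_holes cafes := by
  unfold furthest furthest_alt
  rw [bounds_eq]
  by_cases h : num_holes ≤ 0
  · rw [PySem.List.pyRange_one_eq_nil h]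
    simp only [List.filter_nil, List.foldl_nil]
    omega
  · obtain ⟨n, rfl⟩ : ∃ n : Nat, num_holes = (n : Int) :=
      ⟨num_holes.toNat, (Int.toNat_of_nonneg (by omega)).symm⟩
    have := invariant cafes n
    simp only at this
    obtain ⟨h1, h2, h3, h4, h5⟩ := this
    show ((PySem.List.pyRange 0 (n:Int) 1).foldl (stepA cafes) (0,0)).1 = _
    rw [show (fun (st : Int × Int) b => (max st.1 (b - st.2 - 1), b)) = stepB from rfl]
    rw [h1]

-- ===== VERDICT (by name: the statement is the Claim_ definition above) =====
theorem furthest_spec : Claim_equal_furthest := by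
  intro n cafes _
  exact furthest_eq_alt n cafes
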